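-- pv_equiv track=rewrite | github.com/EDA-Teaching-RJH/assignment-foundations-of-programming-thomas-smout-2005 | fleet_manager.py | calculate_payroll
-- ===== SOURCE A (Python) =====
-- def calculate_payroll(ranks):
--     # Creates a variable to track current payroll total
--     total_payroll = 0
--     # Scrolls through ranks list and turns each rank into a value that is added to the total
--     for _ in ranks:
--         if _ == "Captain":
--             total_payroll = total_payroll + 1000
--         elif _ == "Commander":
--             total_payroll = total_payroll + 800
--         elif _ == "Lt. Commander":
--             total_payroll = total_payroll + 600
--         elif _ == "Lieutenant" or _ == "Doctor":
--             total_payroll = total_payroll + 500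
--         elif _ == "Ensign":
--             total_payroll = total_payroll + 200
--     # returns total
--     return total_payroll
-- ===== SOURCE B (Python) =====
-- from collections import Counter
--
-- PAY = {
--     "Captain": 1000,
--     "Commander": 800,
--     "Lt. Commander": 600,
--     "Lieutenant": 500,
--     "Doctor": 500,
--     "Ensign": 200,
-- }
--
-- def calculate_payroll(ranks):
--     counts = Counter(ranks)
--     return sum(counts.get(rank, 0) * rate for rank, rate in PAY.items())
-- ===== Notes on version B (the rewrite author's own statement) =====
-- stated objective: alternative
-- what changed: Replaces the per-element if/elif branching scan with a Counter frequency table plus one aggregation over a fixed rank->rate dict (count * rate per distinct rank).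
import Mathlib
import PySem

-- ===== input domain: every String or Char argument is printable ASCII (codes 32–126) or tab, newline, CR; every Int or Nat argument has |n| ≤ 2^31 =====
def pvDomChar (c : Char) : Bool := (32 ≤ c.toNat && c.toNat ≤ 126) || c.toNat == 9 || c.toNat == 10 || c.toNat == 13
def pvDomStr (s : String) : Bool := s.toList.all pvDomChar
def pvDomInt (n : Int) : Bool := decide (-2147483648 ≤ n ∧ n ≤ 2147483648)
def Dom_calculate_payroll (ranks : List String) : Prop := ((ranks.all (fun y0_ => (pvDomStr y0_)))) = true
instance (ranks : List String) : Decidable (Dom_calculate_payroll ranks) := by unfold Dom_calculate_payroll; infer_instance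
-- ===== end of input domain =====

-- B replaces A's per-element if/elif scan by a Counter frequency table aggregated against a fixed rank->rate dict (alternative decomposition, same cost).

-- ===== PORT A =====
def calculate_payroll (ranks : List String) : Int :=
  ranks.foldl (fun total_payroll r =>
    if r == "Captain" then total_payroll + 1000
    else if r == "Commander" then total_payroll + 800
    else if r == "Lt. Commander" then total_payroll + 600
    else if r == "Lieutenant" || r == "Doctor" then total_payroll + 500
    else if r == "Ensign" then total_payroll + 200
    else total_payroll) 0

-- ===== PORT B =====
def pvPAY : PySem.Dict String Int :=
  (((((((PySem.Dict.empty).insert "Captain" 1000).insert "Commander" 800).insert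
      "Lt. Commander" 600).insert "Lieutenant" 500).insert "Doctor" 500).insert "Ensign" 200)

def calculate_payroll_alt (ranks : List String) : Int :=
  let counts := PySem.Dict.counter ranks
  (pvPAY.items.map (fun kv => counts.getD kv.1 0 * kv.2)).sum

-- ===== PRECONDITION & SPEC =====
def Spec_calculate_payroll (ranks : List String) (out : Int) : Prop := out = calculate_payroll_alt ranks
instance (ranks : List String) (out : Int) : Decidable (Spec_calculate_payroll ranks out) := by unfold Spec_calculate_payroll; infer_instance

-- ===== CLAIM (what is proved, stated in full; the proofs are below) =====
def Claim_equal_calculate_payroll : Prop := ∀ (ranks : List String), Dom_calculate_payroll ranks → Spec_calculate_payroll ranks (calculate_payroll ranks)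

-- ===== LEMMAS AND PROOFS =====
theorem calculate_payroll_counts (ranks : List String) (a : Int) :
    ranks.foldl (fun total_payroll r =>
      if r == "Captain" then total_payroll + 1000
      else if r == "Commander" then total_payroll + 800
      else if r == "Lt. Commander" then total_payroll + 600
      else if r == "Lieutenant" || r == "Doctor" then total_payroll + 500
      else if r == "Ensign" then total_payroll + 200
      else total_payroll) a
    = a + (ranks.count "Captain" : Int) * 1000 + (ranks.count "Commander" : Int) * 800
        + (ranks.count "Lt. Commander" : Int) * 600 + (ranks.count "Lieutenant" : Int) * 500
        + (ranks.count "Doctor" : Int) * 500 + (ranks.count "Ensign" : Int) * 200 := by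
  induction ranks generalizing a with
  | nil => simp
  | cons x xs ih =>
    rw [List.foldl_cons, ih]
    simp only [List.count_cons, beq_iff_eq, Bool.or_eq_true]
    by_cases h1 : x = "Captain"
    · subst h1; simp; ring
    rw [if_neg h1]
    by_cases h2 : x = "Commander"
    · subst h2; simp; ring
    rw [if_neg h2]
    by_cases h3 : x = "Lt. Commander"
    · subst h3; simp; ring
    rw [if_neg h3]
    by_cases h4 : x = "Lieutenant"
    · subst h4; simp; ring
    by_cases h5 : x = "Doctor"
    · subst h5; simp; ring
    rw [if_neg (by simp [h4, h5] : ¬(x = "Lieutenant" ∨ x = "Doctor"))]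
    by_cases h6 : x = "Ensign"
    · subst h6; simp; ring
    rw [if_neg h6]
    simp [h1, h2, h3, h4, h5, h6]

-- ===== VERDICT (by name: the statement is the Claim_ definition above) =====
theorem calculate_payroll_spec : Claim_equal_calculate_payroll := by
  intro ranks _
  unfold Spec_calculate_payroll calculate_payroll calculate_payroll_alt pvPAY
  rw [calculate_payroll_counts]
  simp [PySem.Dict.insert, PySem.Dict.empty, PySem.Dict.getD_counter]
  ring
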